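-- pv_equiv track=rewrite | github.com/acharles7/problem-solving | Amazon Interview/favorite_genres.py | getUserGenre
-- ===== SOURCE A (Python) =====
-- def getUserGenre(userSongs, songGenres):
--     output = {}
--     reverse_song = {}
--
--     for genre in songGenres:
--         for song in songGenres[genre]:
--             reverse_song[song] = genre
--
--     for user in userSongs:
--         if len(userSongs[user]) >= 1:
--             userGenres = []
--             for song in userSongs[user]:
--                 if song in reverse_song.keys():
--                     userGenres.append(reverse_song[song])
--             output[user] = userGenres
--         else:
--             output[user] = []
--     return output
-- ===== SOURCE B (Python) =====
-- def getUserGenre(userSongs, songGenres):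
--     def genre_of(song):
--         found = None
--         for genre, songs in songGenres.items():
--             if song in songs:
--                 found = genre
--         return found
--
--     return {user: [g for g in map(genre_of, songs) if g is not None]
--             for user, songs in userSongs.items()}
-- ===== Notes on version B (the rewrite author's own statement) =====
-- stated objective: simpler
-- what changed: B drops A's precomputed song->genre reverse index entirely: for each user song it does a single linear scan over songGenres keeping the last genre whose song list contains it, and builds the result as one dict comprehension; Pre_ excludes association lists with duplicate keys, whose behaviour is an artefact of encoding Python dicts as lists.
import Mathlib
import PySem

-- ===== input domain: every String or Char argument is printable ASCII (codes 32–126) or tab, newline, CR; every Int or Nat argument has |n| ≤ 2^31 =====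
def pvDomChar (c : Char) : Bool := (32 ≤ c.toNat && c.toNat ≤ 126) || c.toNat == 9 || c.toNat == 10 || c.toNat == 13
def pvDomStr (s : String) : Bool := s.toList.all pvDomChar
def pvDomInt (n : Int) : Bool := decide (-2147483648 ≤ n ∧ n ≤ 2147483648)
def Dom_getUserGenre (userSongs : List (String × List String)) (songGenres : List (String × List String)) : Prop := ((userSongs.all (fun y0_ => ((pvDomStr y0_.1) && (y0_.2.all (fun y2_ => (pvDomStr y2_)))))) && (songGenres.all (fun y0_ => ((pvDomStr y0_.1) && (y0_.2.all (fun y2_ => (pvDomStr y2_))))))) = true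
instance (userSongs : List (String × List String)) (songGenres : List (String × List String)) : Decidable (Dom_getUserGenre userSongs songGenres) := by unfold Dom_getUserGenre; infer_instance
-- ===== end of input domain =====

-- B drops A's precomputed reverse index: each user song is resolved by one linear scan over
-- songGenres keeping the last genre containing it; objective: simpler.

-- ===== PORT A =====
def getUserGenre (userSongs : List (String × List String)) (songGenres : List (String × List String)) : List (String × List String) :=
  -- reverse_song = {}; for genre in songGenres: for song in songGenres[genre]: reverse_song[song] = genre
  let reverse_song : PySem.Dict String String :=
    songGenres.foldl (fun d p => p.2.foldl (fun d song => d.insert song p.1) d) PySem.Dict.empty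
  -- output = {}; for user in userSongs: …
  let output : PySem.Dict String (List String) :=
    userSongs.foldl (fun out p =>
      if PySem.List.len p.2 ≥ 1 then
        -- userGenres = []; for song …: if song in reverse_song.keys(): userGenres.append(reverse_song[song])
        let userGenres : List String :=
          p.2.foldl (fun acc song =>
            match reverse_song.get? song with
            | some g => acc ++ [g]
            | none => acc) []
        out.insert p.1 userGenres
      else
        out.insert p.1 []) PySem.Dict.empty
  output.items

-- ===== PORT B =====
-- genre_of(song): found = None; for genre, songs in songGenres.items(): if song in songs: found = genre
def genreOf (songGenres : List (String × List String)) (song : String) : Option String :=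
  songGenres.foldl (fun found p => if p.2.contains song then some p.1 else found) none

-- {user: [g for g in map(genre_of, songs) if g is not None] for user, songs in userSongs.items()}
def getUserGenre_alt (userSongs : List (String × List String)) (songGenres : List (String × List String)) : List (String × List String) :=
  userSongs.map (fun p => (p.1, p.2.filterMap (genreOf songGenres)))

-- ===== PRECONDITION & SPEC =====
-- Pre_ excludes association lists with duplicate keys: the Python parameters are dicts, which
-- cannot contain duplicate keys, so behaviour on such lists is an artefact of the encoding.
def Pre_getUserGenre (userSongs : List (String × List String)) (songGenres : List (String × List String)) : Prop :=
  (userSongs.map Prod.fst).Nodup ∧ (songGenres.map Prod.fst).Nodup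
instance (userSongs : List (String × List String)) (songGenres : List (String × List String)) : Decidable (Pre_getUserGenre userSongs songGenres) := by unfold Pre_getUserGenre; infer_instance

def pvWitness_getUserGenre : (List (String × List String)) × (List (String × List String)) :=
  ([("u", ["s1", "x"]), ("v", [])], [("rock", ["s1"]), ("pop", ["s1", "p"])])

def Spec_getUserGenre (userSongs : List (String × List String)) (songGenres : List (String × List String)) (out : List (String × List String)) : Prop := out = getUserGenre_alt userSongs songGenres
instance (userSongs : List (String × List String)) (songGenres : List (String × List String)) (out : List (String × List String)) : Decidable (Spec_getUserGenre userSongs songGenres out) := by unfold Spec_getUserGenre; infer_instance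

-- ===== CLAIM (what is proved, stated in full; the proofs are below) =====
def Claim_equal_getUserGenre : Prop := ∀ (userSongs : List (String × List String)) (songGenres : List (String × List String)), Dom_getUserGenre userSongs songGenres → Pre_getUserGenre userSongs songGenres → Spec_getUserGenre userSongs songGenres (getUserGenre userSongs songGenres)

-- ===== LEMMAS AND PROOFS =====

-- lookup in the inner insert loop of A's reverse map
lemma get_inner (songs : List String) (g : String) (d : PySem.Dict String String) (x : String) :
    (songs.foldl (fun d song => d.insert song g) d).get? x
      = if x ∈ songs then some g else d.get? x := by
  induction songs generalizing d with
  | nil => simp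
  | cons s rest ih =>
    simp only [List.foldl_cons, ih, List.mem_cons]
    rw [PySem.Dict.get?_insert]
    by_cases hx : x ∈ rest <;> by_cases hs : x = s <;> simp [hx, hs]

-- A's finished reverse map looks up exactly B's keep-last-match scan
lemma get_reverse (gs : List (String × List String)) (d : PySem.Dict String String) (x : String) :
    (gs.foldl (fun d p => p.2.foldl (fun d song => d.insert song p.1) d) d).get? x
      = gs.foldl (fun g p => if x ∈ p.2 then some p.1 else g) (d.get? x) := by
  induction gs generalizing d with
  | nil => rfl
  | cons p rest ih => simp only [List.foldl_cons, ih, get_inner]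

lemma get_reverse_empty (gs : List (String × List String)) (x : String) :
    ((gs.foldl (fun d p => p.2.foldl (fun d song => d.insert song p.1) d) PySem.Dict.empty).get? x)
      = genreOf gs x := by
  rw [get_reverse, PySem.Dict.get?_empty]
  unfold genreOf
  have hstep : (fun (found : Option String) (p : String × List String) =>
      if p.2.contains x then some p.1 else found)
      = (fun found p => if x ∈ p.2 then some p.1 else found) := by
    funext found p
    by_cases h : x ∈ p.2 <;> simp [h]
  rw [hstep]

-- A's append loop over one user's songs is a filterMap
lemma foldl_match_filterMap (f : String → Option String) (songs : List String) (acc : List String) :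
    songs.foldl (fun acc song => match f song with | some g => acc ++ [g] | none => acc) acc
      = acc ++ songs.filterMap f := by
  induction songs generalizing acc with
  | nil => simp
  | cons s rest ih =>
    simp only [List.foldl_cons, List.filterMap_cons]
    cases h : f s <;> simp [ih]

theorem getUserGenre_spec : Claim_equal_getUserGenre := by
  intro userSongs songGenres _ hpre
  unfold Spec_getUserGenre getUserGenre getUserGenre_alt
  have hbody : (fun (out : PySem.Dict String (List String)) (p : String × List String) =>
      if PySem.List.len p.2 ≥ 1 then
        out.insert p.1 (p.2.foldl (fun acc song =>
          match (songGenres.foldl (fun d p => p.2.foldl (fun d song => d.insert song p.1) d)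
                  PySem.Dict.empty).get? song with
          | some g => acc ++ [g]
          | none => acc) [])
      else out.insert p.1 [])
      = (fun out p => out.insert p.1 (p.2.filterMap (genreOf songGenres))) := by
    funext out p
    by_cases h : PySem.List.len p.2 ≥ 1
    · simp only [h, if_pos]
      rw [foldl_match_filterMap]
      simp only [List.nil_append]
      congr 1
      exact List.filterMap_congr (fun s _ => get_reverse_empty songGenres s)
    · have hnil : p.2 = [] := by
        by_contra hne
        have hpos : 0 < p.2.length := List.length_pos_iff.mpr hne
        exact h (by simp only [PySem.List.len_eq]; omega)
      simp [hnil]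
  simp only [hbody]
  rw [PySem.Dict.items_foldl_insert_fresh
        (k := Prod.fst) (v := fun p => p.2.filterMap (genreOf songGenres))
        (d := PySem.Dict.empty) (l := userSongs)
        (by intro a _; exact PySem.Dict.contains_empty _) hpre.1]
  simp [PySem.Dict.empty]
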